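-- pv_equiv track=rewrite | github.com/moerbeke/aoc-2019 | aoc16.py | fast_build_element
-- ===== SOURCE A (Python) =====
-- _pattern = None
--
-- def fast_build_element(i, input_signal):
--     ilen = len(input_signal)
--     o = 0
--     if False:
--         pattern = _pattern[i]
--         plen = len(pattern)
--         if i == 0:
--             o += sum(input_signal[0:1]) - sum(input_signal[2:3])
--             o += sum(input_signal[4:5]) - sum(input_signal[6:7])
--             o += sum(input_signal[8:9]) - sum(input_signal[10:11])
--             #...
--             o += sum(input_signal[k:k+1]) - sum(input_signal[k+2:k+3])  # k < ilen
--         elif i == 1: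
--             o += sum(input_signal[1:3]) - sum(input_signal[5:7])
--             o += sum(input_signal[9:11]) - sum(input_signal[13:15])
--             o += sum(input_signal[17:19]) - sum(input_signal[21:23])
--             #...
--             o += sum(input_signal[k:k+2]) - sum(input_signal[k+4:k+6])  # k < ilen
--         elif i == 2:
--             o += sum(input_signal[2:5]) - sum(input_signal[8:11])
--             o += sum(input_signal[14:17]) - sum(input_signal[20:23])
--             o += sum(input_signal[26:29]) - sum(input_signal[32:35])
--             #...
--             o += sum(input_signal[k:k+3]) - sum(input_signal[k+6:k+9])  # k < ilen
--         #...
--         elif i == ilen - 1: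
--             o += sum(input_signal[1*i+0: 2*i+1]) - sum(input_signal[ 3*i+2 : 4*i+3])
--             o += sum(input_signal[5*i+4: 6*i+5]) - sum(input_signal[ 7*i+6 : 8*i+7])
--             o += sum(input_signal[9*i+8:10*i+9]) - sum(input_signal[11*i+10:12*i+11])
--     j = 0
--     while True:
--         a = i * (4*j+1) + 4*j
--         if a > ilen:
--             break
--         b = i * (4*j+2) + (4*j+1)
--         b = min(b, ilen)
--         o += sum(input_signal[a:b])
--         c = i * (4*j+3) + (4*j+2)
--         if c > ilen:
--             break
--         d = i * (4*j+4) + (4*j+3)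
--         d = min(d, ilen)
--         o -= sum(input_signal[c:d])
--         j += 1
--     o = abs(o) % 10
--     return o
-- ===== SOURCE B (Python) =====
-- def fast_build_element(i, input_signal):
--     # Per-element pattern multiplier instead of slice-summing blocks.
--     o = 0
--     for j in range(len(input_signal)):
--         m = ((j + 1) // (i + 1)) % 4
--         if m == 1:
--             o += input_signal[j]
--         elif m == 3:
--             o -= input_signal[j]
--     return abs(o) % 10
-- ===== Notes on version B (the rewrite author's own statement) =====
-- stated objective: simpler
-- what changed: Replaced the dead if-False block and the while-loop that steps through contiguous +/- slice blocks (with min-clamped boundaries and two break points) by a single for-loop over element indices that computes each element's pattern multiplier ((j+1)//(i+1))%4 and adds/subtracts accordingly.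
import Mathlib
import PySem

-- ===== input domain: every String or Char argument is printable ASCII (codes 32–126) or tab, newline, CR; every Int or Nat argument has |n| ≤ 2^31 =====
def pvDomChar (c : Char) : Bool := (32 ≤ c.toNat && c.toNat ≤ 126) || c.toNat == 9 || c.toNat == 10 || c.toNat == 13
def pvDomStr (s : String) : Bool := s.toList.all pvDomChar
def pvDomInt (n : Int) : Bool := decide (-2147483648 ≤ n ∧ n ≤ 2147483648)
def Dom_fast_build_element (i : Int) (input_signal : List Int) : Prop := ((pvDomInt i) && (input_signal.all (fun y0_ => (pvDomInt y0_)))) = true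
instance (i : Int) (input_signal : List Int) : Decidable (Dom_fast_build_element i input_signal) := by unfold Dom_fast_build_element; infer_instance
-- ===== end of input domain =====

-- B replaces A's block/slice-stepping while-loop by a per-element loop using the pattern
-- multiplier ((j+1)//(i+1)) % 4; objective: simpler.

-- ===== PORT A =====
-- A's `while True` loop, one fuel unit per iteration.  For 0 ≤ i the break bound
-- a = 4*(i+1)*j + i grows by at least 4 per iteration, so len+2 units of fuel are never
-- exhausted on inputs satisfying Pre_ (the fuel-0 value is never reached there).
-- A's `if False:` block is dead code and is omitted.
def fastALoop (i : Int) (xs : List Int) (fuel : Nat) (j : Int) (o : Int) : Int :=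
  match fuel with
  | 0 => o
  | Nat.succ fuel =>
    let ilen : Int := xs.length
    let a := i * (4*j+1) + 4*j
    if a > ilen then o
    else
      let b := min (i * (4*j+2) + (4*j+1)) ilen
      let o1 := o + (PySem.List.slice xs (some a) (some b)).sum
      let c := i * (4*j+3) + (4*j+2)
      if c > ilen then o1
      else
        let d := min (i * (4*j+4) + (4*j+3)) ilen
        let o2 := o1 - (PySem.List.slice xs (some c) (some d)).sum
        fastALoop i xs fuel (j+1) o2

def fast_build_element (i : Int) (input_signal : List Int) : Int :=
  PySem.Int.mod |fastALoop i input_signal (input_signal.length + 2) 0 0| 10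

-- ===== PORT B =====
def fast_build_element_alt (i : Int) (input_signal : List Int) : Int :=
  let o := (List.range input_signal.length).foldl (fun (o : Int) (j : Nat) =>
    let m := PySem.Int.mod (PySem.Int.floordiv ((j : Int) + 1) (i + 1)) 4
    if m = 1 then o + PySem.List.pyGetD input_signal (j : Int) 0
    else if m = 3 then o - PySem.List.pyGetD input_signal (j : Int) 0
    else o) 0
  PySem.Int.mod |o| 10

-- ===== PRECONDITION & SPEC =====
-- For i < 0 the Python A never returns: its break bounds a = 4*(i+1)*j + i and
-- c = a + 2*(i+1) never exceed len(input_signal) ≥ 0, so the while-loop runs forever;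
-- Pre_ excludes exactly these non-returning inputs (B would raise ZeroDivisionError at i = -1).
def Pre_fast_build_element (i : Int) (input_signal : List Int) : Prop := 0 ≤ i
instance (i : Int) (input_signal : List Int) : Decidable (Pre_fast_build_element i input_signal) := by unfold Pre_fast_build_element; infer_instance
def pvWitness_fast_build_element : Int × List Int := (1, [3, -2, 7, 4])

def Spec_fast_build_element (i : Int) (input_signal : List Int) (out : Int) : Prop := out = fast_build_element_alt i input_signal
instance (i : Int) (input_signal : List Int) (out : Int) : Decidable (Spec_fast_build_element i input_signal out) := by unfold Spec_fast_build_element; infer_instance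

-- ===== CLAIM (what is proved, stated in full; the proofs are below) =====
def Claim_equal_fast_build_element : Prop := ∀ (i : Int) (input_signal : List Int), Dom_fast_build_element i input_signal → Pre_fast_build_element i input_signal → Spec_fast_build_element i input_signal (fast_build_element i input_signal)

-- ===== LEMMAS AND PROOFS =====

-- The per-element contribution B's loop adds at index k (the FFT pattern coefficient times xs[k]).
def gfun (i : Int) (xs : List Int) (k : Int) : Int :=
  let m := PySem.Int.mod (PySem.Int.floordiv (k + 1) (i + 1)) 4
  if m = 1 then PySem.List.pyGetD xs k 0
  else if m = 3 then -(PySem.List.pyGetD xs k 0)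
  else 0

-- Sum of g over the integer interval [lo, hi).
def sIco (g : Int → Int) (lo hi : Int) : Int := ((PySem.List.pyRange lo hi).map g).sum

theorem sIco_empty (g : Int → Int) {lo hi : Int} (h : hi ≤ lo) : sIco g lo hi = 0 := by
  have : (hi - lo).toNat = 0 := by omega
  simp [sIco, PySem.List.pyRange_one, this]

theorem sIco_split (g : Int → Int) {lo mid hi : Int} (h1 : lo ≤ mid) (h2 : mid ≤ hi) :
    sIco g lo hi = sIco g lo mid + sIco g mid hi := by
  simp [sIco, PySem.List.pyRange_one_append lo mid hi h1 h2]

theorem sIco_congr {g h : Int → Int} {lo hi : Int}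
    (he : ∀ k, lo ≤ k → k < hi → g k = h k) : sIco g lo hi = sIco h lo hi := by
  unfold sIco
  congr 1
  apply List.map_congr_left
  intro k hk
  rw [PySem.List.mem_pyRange_one] at hk
  exact he k hk.1 hk.2

theorem sIco_zero {g : Int → Int} {lo hi : Int}
    (he : ∀ k, lo ≤ k → k < hi → g k = 0) : sIco g lo hi = 0 := by
  rw [sIco_congr he]
  simp [sIco]

theorem sIco_neg (g : Int → Int) (lo hi : Int) :
    sIco (fun k => -(g k)) lo hi = -(sIco g lo hi) := by
  unfold sIco
  rw [List.sum_neg, List.map_map]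
  rfl

theorem sIco_from_min (g : Int → Int) (x hi : Int) :
    sIco g (min x hi) hi = sIco g x hi := by
  rcases le_total x hi with h | h
  · rw [min_eq_left h]
  · rw [min_eq_right h, sIco_empty g le_rfl, sIco_empty g h]

theorem take_drop_sum (xs : List Int) : ∀ (q p : Nat), p + q ≤ xs.length →
    ((xs.drop p).take q).sum = ((List.range q).map (fun t => xs.getD (p + t) 0)).sum := by
  intro q
  induction q with
  | zero => simp
  | succ q ih =>
    intro p hpq
    rw [List.take_add_one, List.sum_append, List.range_succ, List.map_append, List.sum_append,
      ih p (by omega)]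
    have hq : (xs.drop p)[q]? = xs[p + q]? := by
      rw [List.getElem?_drop]
    have hlt : p + q < xs.length := by omega
    rw [hq]
    simp [List.getD_eq_getElem?_getD, List.getElem?_eq_getElem hlt]

theorem slice_sum (xs : List Int) {a b : Int} (ha : 0 ≤ a) (hab : a ≤ b)
    (hb : b ≤ (xs.length : Int)) :
    (PySem.List.slice xs (some a) (some b)).sum = sIco (fun k => PySem.List.pyGetD xs k 0) a b := by
  rw [PySem.List.slice_toNat xs ha (le_trans ha hab)]
  rw [take_drop_sum xs (b.toNat - a.toNat) a.toNat (by omega)]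
  unfold sIco
  rw [PySem.List.pyRange_one, List.map_map]
  have hn : (b - a).toNat = b.toNat - a.toNat := by omega
  rw [hn]
  congr 1
  apply List.map_congr_left
  intro t ht
  simp only [Function.comp]
  rw [PySem.List.pyGetD_of_nonneg xs 0 (by omega : (0:Int) ≤ a + (t:Int))]
  congr 1
  omega

theorem fdiv_block {i j t k : Int} (hi : 0 ≤ i)
    (h1 : 4*(i+1)*j + i + t*(i+1) ≤ k) (h2 : k < 4*(i+1)*j + i + (t+1)*(i+1)) :
    PySem.Int.floordiv (k + 1) (i + 1) = 4*j + 1 + t := by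
  rw [PySem.Int.floordiv_eq_iff_of_pos (by omega)]
  constructor <;> nlinarith

theorem gfun_block0 (i : Int) (xs : List Int) {j k : Int} (hi : 0 ≤ i)
    (h1 : 4*(i+1)*j + i ≤ k) (h2 : k < 4*(i+1)*j + i + (i+1)) :
    gfun i xs k = PySem.List.pyGetD xs k 0 := by
  unfold gfun
  rw [fdiv_block (j := j) (t := 0) hi (by linarith) (by linarith)]
  rw [PySem.Int.mod_eq_emod_of_pos (by omega)]
  simp

theorem gfun_block1 (i : Int) (xs : List Int) {j k : Int} (hi : 0 ≤ i)
    (h1 : 4*(i+1)*j + i + (i+1) ≤ k) (h2 : k < 4*(i+1)*j + i + 2*(i+1)) :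
    gfun i xs k = 0 := by
  unfold gfun
  rw [fdiv_block (j := j) (t := 1) hi (by linarith) (by linarith)]
  rw [PySem.Int.mod_eq_emod_of_pos (by omega)]
  have h3 : ¬ ((4*j + 1 + 1) % 4 = 1) := by omega
  have h4 : ¬ ((4*j + 1 + 1) % 4 = 3) := by omega
  simp [h3, h4]

theorem gfun_block2 (i : Int) (xs : List Int) {j k : Int} (hi : 0 ≤ i)
    (h1 : 4*(i+1)*j + i + 2*(i+1) ≤ k) (h2 : k < 4*(i+1)*j + i + 3*(i+1)) :
    gfun i xs k = -(PySem.List.pyGetD xs k 0) := by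
  unfold gfun
  rw [fdiv_block (j := j) (t := 2) hi (by linarith) (by linarith)]
  rw [PySem.Int.mod_eq_emod_of_pos (by omega)]
  have h4 : (4*j + 1 + 2) % 4 = 3 := by omega
  simp [h4]

theorem gfun_block3 (i : Int) (xs : List Int) {j k : Int} (hi : 0 ≤ i)
    (h1 : 4*(i+1)*j + i + 3*(i+1) ≤ k) (h2 : k < 4*(i+1)*j + i + 4*(i+1)) :
    gfun i xs k = 0 := by
  unfold gfun
  rw [fdiv_block (j := j) (t := 3) hi (by linarith) (by linarith)]
  rw [PySem.Int.mod_eq_emod_of_pos (by omega)]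
  have h3 : ¬ ((4*j + 1 + 3) % 4 = 1) := by omega
  have h4 : ¬ ((4*j + 1 + 3) % 4 = 3) := by omega
  simp [h3, h4]

theorem gfun_prefix (i : Int) (xs : List Int) {k : Int} (hi : 0 ≤ i)
    (h1 : 0 ≤ k) (h2 : k < i) : gfun i xs k = 0 := by
  unfold gfun
  have hf : PySem.Int.floordiv (k + 1) (i + 1) = 0 := by
    rw [PySem.Int.floordiv_eq_iff_of_pos (by omega)]
    constructor <;> nlinarith
  rw [hf]
  simp [PySem.Int.mod_eq_emod_of_pos]

theorem loopA_eq (i : Int) (xs : List Int) (hi : 0 ≤ i) :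
    ∀ (fuel : Nat) (j o : Int), 0 ≤ j →
      ((xs.length : Int) < 4*(i+1)*(j + (fuel : Int)) + i) →
      fastALoop i xs fuel j o = o + sIco (gfun i xs) (4*(i+1)*j + i) (xs.length : Int) := by
  intro fuel
  induction fuel with
  | zero =>
    intro j o hj hfuel
    rw [Nat.cast_zero, add_zero] at hfuel
    simp only [fastALoop]
    rw [sIco_empty _ (le_of_lt hfuel), add_zero]
  | succ fuel ih =>
    intro j o hj hfuel
    have hbase0 : (0:Int) ≤ 4*(i+1)*j + i := by nlinarith
    have hn0 : (0:Int) ≤ (xs.length : Int) := Int.natCast_nonneg _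
    have e1 : i * (4*j+1) + 4*j = 4*(i+1)*j + i := by ring
    have e2 : i * (4*j+2) + (4*j+1) = 4*(i+1)*j + i + (i+1) := by ring
    have e3 : i * (4*j+3) + (4*j+2) = 4*(i+1)*j + i + 2*(i+1) := by ring
    have e5 : i * (4*j+4) + (4*j+3) = 4*(i+1)*j + i + 3*(i+1) := by ring
    simp only [fastALoop]
    rw [e1, e2, e3, e5]
    split_ifs with hA hC
    · -- a > ilen: loop breaks with o; the interval [a, n) is empty
      rw [sIco_empty _ (le_of_lt hA), add_zero]
    · -- a ≤ ilen < c: one positive slice, then break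
      rw [not_lt] at hA
      congr 1
      rw [slice_sum xs (a := 4*(i+1)*j + i)
        (b := min (4*(i+1)*j + i + (i+1)) (xs.length : Int)) hbase0
        (le_min (by linarith) hA) (min_le_right _ _)]
      rw [sIco_split (gfun i xs) (lo := 4*(i+1)*j + i)
        (mid := min (4*(i+1)*j + i + (i+1)) (xs.length : Int)) (hi := (xs.length : Int))
        (le_min (by linarith) hA) (min_le_right _ _)]
      rw [sIco_zero (g := gfun i xs)
        (lo := min (4*(i+1)*j + i + (i+1)) (xs.length : Int)) ?_, add_zero]
      · exact (sIco_congr (fun k hk1 hk2 => gfun_block0 i xs hi hk1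
          (lt_of_lt_of_le hk2 (min_le_left _ _)))).symm
      · intro k hk1 hk2
        rcases le_total (4*(i+1)*j + i + (i+1)) (xs.length : Int) with h | h
        · rw [min_eq_left h] at hk1
          exact gfun_block1 i xs hi hk1 (by linarith)
        · rw [min_eq_right h] at hk1
          omega
    · -- full block: positive slice, negative slice, recurse
      rw [not_lt] at hA hC
      rw [ih (j+1) _ (by linarith) (by
        have e6 : 4*(i+1)*((j+1) + (fuel : Int)) + i
            = 4*(i+1)*(j + ((fuel + 1 : Nat) : Int)) + i := by push_cast; ring
        rw [e6]
        exact hfuel)]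
      have e4 : 4*(i+1)*(j+1) + i = 4*(i+1)*j + i + 4*(i+1) := by ring
      rw [e4]
      -- evaluate the two slice sums
      have hb1 : min (4*(i+1)*j + i + (i+1)) (xs.length : Int) = 4*(i+1)*j + i + (i+1) :=
        min_eq_left (by linarith)
      rw [hb1]
      rw [slice_sum xs hbase0 (by linarith) (by linarith)]
      rw [slice_sum xs (by linarith) (le_min (by linarith) hC) (min_le_right _ _)]
      -- decompose the right-hand interval sum into the four pattern blocks
      rw [sIco_split (gfun i xs) (by linarith : 4*(i+1)*j + i ≤ 4*(i+1)*j + i + (i+1))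
        (by linarith : 4*(i+1)*j + i + (i+1) ≤ (xs.length : Int))]
      rw [sIco_split (gfun i xs) (by linarith : 4*(i+1)*j + i + (i+1) ≤ 4*(i+1)*j + i + 2*(i+1))
        (hC : 4*(i+1)*j + i + 2*(i+1) ≤ (xs.length : Int))]
      rw [sIco_split (gfun i xs) (le_min (by linarith) hC)
        (min_le_right (4*(i+1)*j + i + 3*(i+1)) (xs.length : Int))]
      rw [sIco_split (gfun i xs)
        (le_min (le_trans (min_le_left _ _) (by linarith)) (min_le_right _ _))
        (min_le_right (4*(i+1)*j + i + 4*(i+1)) (xs.length : Int))]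
      rw [sIco_from_min (gfun i xs) (4*(i+1)*j + i + 4*(i+1)) (xs.length : Int)]
      -- block 0 carries the values, block 1 vanishes
      rw [sIco_congr (fun k hk1 hk2 => gfun_block0 i xs hi hk1 hk2)]
      rw [sIco_zero (fun k hk1 hk2 => gfun_block1 i xs hi hk1 hk2), zero_add]
      -- block 2 carries the negated values
      rw [sIco_congr (g := gfun i xs) (h := fun k => -(PySem.List.pyGetD xs k 0))
        (fun k hk1 hk2 => gfun_block2 i xs hi hk1
          (lt_of_lt_of_le hk2 (min_le_left _ _)))]
      rw [sIco_neg]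
      -- block 3 vanishes
      rw [sIco_zero (g := gfun i xs)
        (lo := min (4*(i+1)*j + i + 3*(i+1)) (xs.length : Int))
        (hi := min (4*(i+1)*j + i + 4*(i+1)) (xs.length : Int)) ?_, zero_add]
      · ring
      · intro k hk1 hk2
        rcases le_total (4*(i+1)*j + i + 3*(i+1)) (xs.length : Int) with h | h
        · rw [min_eq_left h] at hk1
          exact gfun_block3 i xs hi hk1 (lt_of_lt_of_le hk2 (min_le_left _ _))
        · rw [min_eq_right h] at hk1
          have := lt_of_lt_of_le hk2 (min_le_right _ _)
          omega

theorem A_closed (i : Int) (xs : List Int) (hi : 0 ≤ i) :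
    fastALoop i xs (xs.length + 2) 0 0 = sIco (gfun i xs) i (xs.length : Int) := by
  have h := loopA_eq i xs hi (xs.length + 2) 0 0 le_rfl (by push_cast; nlinarith [Int.natCast_nonneg xs.length])
  simpa using h

theorem prefix_zero (i : Int) (xs : List Int) (hi : 0 ≤ i) :
    sIco (gfun i xs) 0 (xs.length : Int) = sIco (gfun i xs) i (xs.length : Int) := by
  rcases le_total i (xs.length : Int) with h | h
  · rw [sIco_split (gfun i xs) hi h,
      sIco_zero (fun k hk1 hk2 => gfun_prefix i xs hi hk1 hk2), zero_add]
  · rw [sIco_empty _ h,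
      sIco_zero (fun k hk1 hk2 => gfun_prefix i xs hi hk1 (by omega))]

theorem B_closed (i : Int) (xs : List Int) :
    fast_build_element_alt i xs = PySem.Int.mod |sIco (gfun i xs) 0 (xs.length : Int)| 10 := by
  unfold fast_build_element_alt
  have hb : (fun (o : Int) (j : Nat) =>
      let m := PySem.Int.mod (PySem.Int.floordiv ((j : Int) + 1) (i + 1)) 4
      if m = 1 then o + PySem.List.pyGetD xs (j : Int) 0
      else if m = 3 then o - PySem.List.pyGetD xs (j : Int) 0
      else o) = fun (o : Int) (j : Nat) => o + gfun i xs (j : Int) := by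
    funext o j
    simp only [gfun]
    split_ifs <;> ring
  rw [hb, PySem.List.foldl_add, zero_add]
  unfold sIco
  rw [PySem.List.pyRange_one, List.map_map]
  simp
  rfl

-- ===== VERDICT (by name: the statement is the Claim_ definition above) =====
theorem fast_build_element_spec : Claim_equal_fast_build_element := by
  intro i xs _ hpre
  unfold Spec_fast_build_element
  unfold fast_build_element
  rw [A_closed i xs hpre, B_closed i xs, prefix_zero i xs hpre]
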